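-- pv_equiv track=rewrite | github.com/farmisen/scrapinator | examples/playwright_best_practices/security_patterns.py | sanitize_selector
-- ===== SOURCE A (Python) =====
-- def sanitize_selector(selector: str) -> str:
--     """Sanitize CSS selector to prevent injection"""
--
--     # Remove potentially dangerous characters
--     dangerous_chars = ["<", ">", '"', "'", "&", ";", "(", ")", "{", "}", "\\"]
--
--     sanitized = selector
--     for char in dangerous_chars:
--         sanitized = sanitized.replace(char, "")
--
--     # Limit length
--     max_length = 200
--     if len(sanitized) > max_length:
--         sanitized = sanitized[:max_length]
--
--     return sanitized
-- ===== SOURCE B (Python) =====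
-- _DANGEROUS = frozenset('<>"\'&;(){}\\')
--
--
-- def sanitize_selector(selector: str) -> str:
--     """Sanitize CSS selector to prevent injection"""
--     sanitized = "".join(ch for ch in selector if ch not in _DANGEROUS)
--     max_length = 200
--     if len(sanitized) > max_length:
--         sanitized = sanitized[:max_length]
--     return sanitized
-- ===== Notes on version B (the rewrite author's own statement) =====
-- stated objective: idiomatic
-- what changed: Replaces A's eleven full-string .replace() passes with a single pass over the input that keeps each character not in a frozenset of dangerous characters, then the same truncation.
import Mathlib
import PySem

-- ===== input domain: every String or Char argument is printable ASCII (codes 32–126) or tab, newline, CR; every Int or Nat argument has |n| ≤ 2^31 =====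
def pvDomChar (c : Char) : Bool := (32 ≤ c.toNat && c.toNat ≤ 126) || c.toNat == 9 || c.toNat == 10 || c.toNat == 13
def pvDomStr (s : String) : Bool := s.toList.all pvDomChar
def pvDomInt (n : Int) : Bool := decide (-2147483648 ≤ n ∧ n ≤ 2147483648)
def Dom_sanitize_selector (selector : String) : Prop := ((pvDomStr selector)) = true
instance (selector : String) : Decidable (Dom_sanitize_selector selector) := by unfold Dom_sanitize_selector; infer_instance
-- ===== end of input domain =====

-- B replaces A's eleven full-string .replace() passes with one filtering pass over the input (idiomatic single pass; speed not claimed).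

-- ===== PORT A =====
def sanitize_selector (selector : String) : String :=
  let dangerous_chars : List String := ["<", ">", "\"", "'", "&", ";", "(", ")", "{", "}", "\\"]
  let sanitized := dangerous_chars.foldl (fun s ch => PySem.Str.replace s ch "") selector
  if PySem.Str.len sanitized > 200 then PySem.Str.slice sanitized none (some 200) else sanitized

-- ===== PORT B =====
def pvDangerousSet : List Char := ['<', '>', '"', '\'', '&', ';', '(', ')', '{', '}', '\\']

def sanitize_selector_alt (selector : String) : String :=
  let sanitized := String.ofList (selector.toList.filter (fun c => !(pvDangerousSet.contains c)))
  if PySem.Str.len sanitized > 200 then PySem.Str.slice sanitized none (some 200) else sanitized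

-- ===== PRECONDITION & SPEC =====
def Spec_sanitize_selector (selector : String) (out : String) : Prop := out = sanitize_selector_alt selector
instance (selector : String) (out : String) : Decidable (Spec_sanitize_selector selector out) := by unfold Spec_sanitize_selector; infer_instance

-- ===== CLAIM (what is proved, stated in full; the proofs are below) =====
def Claim_equal_sanitize_selector : Prop := ∀ (selector : String), Dom_sanitize_selector selector → Spec_sanitize_selector selector (sanitize_selector selector)

-- ===== LEMMAS AND PROOFS =====

-- replace.go for a single-char pattern and empty replacement is a filter
lemma replace_go_single (c : Char) :
    ∀ (fuel : Nat) (l acc : List Char), l.length ≤ fuel →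
      PySem.Chars.replace.go [c] [] fuel l acc = acc.reverse ++ l.filter (· != c) := by
  intro fuel
  induction fuel with
  | zero =>
    intro l acc h
    cases l with
    | nil => simp [PySem.Chars.replace.go]
    | cons x t => simp at h
  | succ n ih =>
    intro l acc h
    cases l with
    | nil => simp [PySem.Chars.replace.go]
    | cons x t =>
      rw [PySem.Chars.replace.go]
      by_cases hx : c = x
      · subst hx
        simp only [List.isPrefixOf, List.isPrefixOf_nil_left, Bool.and_true, beq_self_eq_true,
          if_pos]
        rw [ih _ _ (by simpa using Nat.le_of_succ_le_succ h)]
        simp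
      · have hpre : [c].isPrefixOf (x :: t) = false := by
          simp [List.isPrefixOf, hx]
        rw [hpre]
        simp only [Bool.false_eq_true, if_false]
        rw [ih _ _ (by simpa using Nat.le_of_succ_le_succ h)]
        simp [List.filter_cons, Ne.symm hx, bne]

-- s.replace(c, "") for a single character c is a filter
lemma replace_single (c : Char) (l : List Char) :
    PySem.Chars.replace l [c] [] = l.filter (· != c) := by
  rw [PySem.Chars.replace]
  simp only [List.isEmpty_cons, Bool.false_eq_true, if_false]
  exact replace_go_single c l.length l [] (le_refl _)

-- the chain of the eleven replaces equals B's single filter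
lemma chain_eq_filter (l : List Char) :
    (["<", ">", "\"", "'", "&", ";", "(", ")", "{", "}", "\\"].foldl
        (fun s ch => PySem.Str.replace s ch "") (String.ofList l)).toList
      = l.filter (fun c => !(pvDangerousSet.contains c)) := by
  simp only [List.foldl_cons, List.foldl_nil]
  have h : ∀ (s : String) (ch : String) (c : Char), ch.toList = [c] →
      (PySem.Str.replace s ch "").toList = s.toList.filter (· != c) := by
    intro s ch c hch
    rw [PySem.Str.toList_replace, hch]
    simpa using replace_single c s.toList
  rw [h _ _ '\\' rfl, h _ _ '}' rfl, h _ _ '{' rfl, h _ _ ')' rfl, h _ _ '(' rfl,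
      h _ _ ';' rfl, h _ _ '&' rfl, h _ _ '\'' rfl, h _ _ '"' rfl, h _ _ '>' rfl,
      h _ _ '<' rfl]
  simp only [List.filter_filter, String.toList_ofList]
  apply List.filter_congr
  intro x _
  rw [Bool.eq_iff_iff]
  simp [pvDangerousSet, bne]
  tauto

-- ===== VERDICT (by name: the statement is the Claim_ definition above) =====
theorem sanitize_selector_spec : Claim_equal_sanitize_selector := by
  intro selector _
  unfold Spec_sanitize_selector sanitize_selector sanitize_selector_alt
  have key : (["<", ">", "\"", "'", "&", ";", "(", ")", "{", "}", "\\"].foldl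
        (fun s ch => PySem.Str.replace s ch "") selector)
      = String.ofList (selector.toList.filter (fun c => !(pvDangerousSet.contains c))) := by
    apply String.toList_inj.mp
    have := chain_eq_filter selector.toList
    rw [String.ofList_toList] at this
    rw [this, String.toList_ofList]
  simp only [key]
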